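-- pv_equiv track=rewrite | github.com/sydanishraza/promptsupport.io | backend/media_intelligence.py | _calculate_insertion_point
-- ===== SOURCE A (Python) =====
-- def _calculate_insertion_point(article_content: str, section_title: str) -> int:
--     """Calculate the character position for media insertion"""
--     lines = article_content.split('\n')
--     char_count = 0
--
--     for i, line in enumerate(lines):
--         if section_title.lower() in line.lower() and line.startswith('#'):
--             # Insert after the section heading and any immediate paragraph
--             char_count += len(line) + 1  # +1 for newline
--
--             # Look for the end of the first paragraph after the heading
--             for j in range(i + 1, len(lines)):
--                 if lines[j].strip() == '':
--                     break
--                 char_count += len(lines[j]) + 1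
--
--             return char_count
--         else:
--             char_count += len(line) + 1
--
--     return char_count // 2  # Default to middle of content
-- ===== SOURCE B (Python) =====
-- def _calculate_insertion_point(article_content: str, section_title: str) -> int:
--     """Calculate the character position for media insertion"""
--     lines = article_content.split('\n')
--     # prefix-offset table: offsets[k] = total chars (len+1 each) of lines before index k
--     offsets = [0]
--     for line in lines:
--         offsets.append(offsets[-1] + len(line) + 1)
--     needle = section_title.lower()
--     idx = next((i for i, line in enumerate(lines)
--                 if needle in line.lower() and line.startswith('#')), None)
--     if idx is None:
--         return offsets[-1] // 2
--     j = idx + 1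
--     while j < len(lines) and lines[j].strip():
--         j += 1
--     return offsets[j]
-- ===== Notes on version B (the rewrite author's own statement) =====
-- stated objective: alternative
-- what changed: B replaces A's running character counter and accumulating inner loop by a precomputed prefix-offset table plus a first-match index search; the insertion point (and the no-match default) is read directly off the table at the index reached after skipping consecutive non-blank lines.
import Mathlib
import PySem

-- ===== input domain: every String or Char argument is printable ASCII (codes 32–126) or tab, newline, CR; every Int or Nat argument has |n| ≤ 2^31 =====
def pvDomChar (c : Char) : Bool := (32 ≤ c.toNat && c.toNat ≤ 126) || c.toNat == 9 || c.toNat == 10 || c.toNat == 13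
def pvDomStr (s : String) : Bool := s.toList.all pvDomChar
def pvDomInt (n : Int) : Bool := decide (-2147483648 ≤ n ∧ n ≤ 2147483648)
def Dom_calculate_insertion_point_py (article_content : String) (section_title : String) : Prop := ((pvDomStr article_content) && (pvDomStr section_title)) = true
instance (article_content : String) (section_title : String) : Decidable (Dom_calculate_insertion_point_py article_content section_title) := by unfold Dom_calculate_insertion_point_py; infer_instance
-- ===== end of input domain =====

-- B replaces A's running character counter by a prefix-offset table plus a first-match
-- index search, reading the answer off the table (objective: alternative decomposition).

-- ===== PORT A =====
-- inner loop: for j in range(i+1, len(lines)): if lines[j].strip()=='' break else char_count += len+1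
def pvInnerA (all : List String) : List Int → Int → Int
  | [], cc => cc
  | j :: rest, cc =>
    match PySem.List.pyGet? all j with
    | none => cc   -- unreachable: j ∈ range(i+1, len(lines))
    | some l =>
      if PySem.Str.strip l = "" then cc
      else pvInnerA all rest (cc + PySem.Str.len l + 1)

-- outer loop: for i, line in enumerate(lines): …
def pvOuterA (title : String) (all : List String) : List String → Int → Int → Int
  | [], _, cc => PySem.Int.floordiv cc 2
  | l :: rest, i, cc =>
    if PySem.Str.isIn (PySem.Str.lower title) (PySem.Str.lower l) && PySem.Str.startswith l "#" then
      pvInnerA all (PySem.List.pyRange (i + 1) (all.length : Int) 1) (cc + PySem.Str.len l + 1)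
    else
      pvOuterA title all rest (i + 1) (cc + PySem.Str.len l + 1)

def calculate_insertion_point_py (article_content : String) (section_title : String) : Int :=
  let lines := (PySem.Str.split? article_content "\n").getD []
  pvOuterA section_title lines lines 0 0

-- ===== PORT B =====
-- offsets = [0]; for line in lines: offsets.append(offsets[-1] + len(line) + 1)
def pvOffsetsB : List String → Int → List Int
  | [], _ => []
  | l :: rest, acc => (acc + PySem.Str.len l + 1) :: pvOffsetsB rest (acc + PySem.Str.len l + 1)

-- while j < len(lines) and lines[j].strip(): j += 1   (recursion over the suffix lines[j:])
def pvAdvanceB : List String → Nat → Nat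
  | [], j => j
  | l :: rest, j => if PySem.Str.strip l = "" then j else pvAdvanceB rest (j + 1)

def calculate_insertion_point_py_alt (article_content : String) (section_title : String) : Int :=
  let lines := (PySem.Str.split? article_content "\n").getD []
  let offsets := (0 : Int) :: pvOffsetsB lines 0
  let needle := PySem.Str.lower section_title
  match lines.findIdx? (fun line => PySem.Str.isIn needle (PySem.Str.lower line) && PySem.Str.startswith line "#") with
  | none => PySem.Int.floordiv ((PySem.List.pyGet? offsets (-1)).getD 0) 2
  | some i =>
    let j := pvAdvanceB (lines.drop (i + 1)) (i + 1)
    (PySem.List.pyGet? offsets (j : Int)).getD 0   -- always in range: j ≤ len(lines)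

-- ===== PRECONDITION & SPEC =====
def Spec_calculate_insertion_point_py (article_content : String) (section_title : String) (out : Int) : Prop := out = calculate_insertion_point_py_alt article_content section_title
instance (article_content : String) (section_title : String) (out : Int) : Decidable (Spec_calculate_insertion_point_py article_content section_title out) := by unfold Spec_calculate_insertion_point_py; infer_instance

-- ===== CLAIM (what is proved, stated in full; the proofs are below) =====
def Claim_equal_calculate_insertion_point_py : Prop := ∀ (article_content : String) (section_title : String), Dom_calculate_insertion_point_py article_content section_title → Spec_calculate_insertion_point_py article_content section_title (calculate_insertion_point_py article_content section_title)

-- ===== LEMMAS AND PROOFS =====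

-- total characters (len+1 each) of a list of lines
def pvOff (lines : List String) : Int := (lines.map (fun l => PySem.Str.len l + 1)).sum

-- the non-blank predicate of the inner scan
def pvNB (l : String) : Bool := !(PySem.Str.strip l == "")

theorem pvOff_append (xs ys : List String) : pvOff (xs ++ ys) = pvOff xs + pvOff ys := by
  simp [pvOff]

theorem pvOffsetsB_eq (lines : List String) : ∀ acc : Int,
    acc :: pvOffsetsB lines acc
      = (List.range (lines.length + 1)).map (fun k => acc + pvOff (lines.take k)) := by
  induction lines with
  | nil => intro acc; simp [pvOffsetsB, pvOff]
  | cons l rest ih =>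
    intro acc
    simp only [List.length_cons]
    rw [List.range_succ_eq_map]
    simp only [List.map_cons, List.map_map, pvOffsetsB]
    rw [ih (acc + PySem.Str.len l + 1)]
    simp only [List.take_zero, pvOff, List.map_nil, List.sum_nil, add_zero]
    congr 1
    apply List.map_congr_left
    intro k _
    simp [List.take_succ_cons]
    ring

theorem pvAdvance_eq (rest : List String) : ∀ j : Nat,
    pvAdvanceB rest j = j + (rest.takeWhile pvNB).length := by
  induction rest with
  | nil => intro j; simp [pvAdvanceB]
  | cons l t ih =>
    intro j
    by_cases h : PySem.Str.strip l = ""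
    · have hb : pvNB l = false := by simp [pvNB, h]
      rw [List.takeWhile_cons, hb]
      simp [pvAdvanceB, h]
    · have hb : pvNB l = true := by simp [pvNB, h]
      rw [List.takeWhile_cons, hb]
      simp only [pvAdvanceB, h, if_false, if_true]
      rw [ih (j + 1)]
      simp
      omega

theorem pvInner_eq (all : List String) : ∀ (fuel j : Nat), all.length - j = fuel → j ≤ all.length → ∀ cc : Int,
    pvInnerA all (PySem.List.pyRange (j : Int) (all.length : Int) 1) cc
      = cc + pvOff ((all.drop j).takeWhile pvNB) := by
  intro fuel
  induction fuel with
  | zero =>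
    intro j hf hj cc
    have hj' : j = all.length := by omega
    rw [PySem.List.pyRange_one_eq_nil (by omega)]
    simp [pvInnerA, hj', pvOff]
  | succ n ih =>
    intro j hf hj cc
    have hlt : j < all.length := by omega
    rw [PySem.List.pyRange_one_cons (by exact_mod_cast hlt)]
    have hdrop : all.drop j = all[j] :: all.drop (j + 1) := List.drop_eq_getElem_cons hlt
    simp only [pvInnerA, PySem.List.pyGet?_natCast, List.getElem?_eq_getElem hlt]
    by_cases h : PySem.Str.strip all[j] = ""
    · have hb : pvNB all[j] = false := by simp [pvNB, h]
      have ht : (all.drop j).takeWhile pvNB = [] := by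
        rw [hdrop, List.takeWhile_cons, hb]; simp
      simp [h, ht, pvOff]
    · have hb : pvNB all[j] = true := by simp [pvNB, h]
      have ht : (all.drop j).takeWhile pvNB = all[j] :: (all.drop (j + 1)).takeWhile pvNB := by
        rw [hdrop, List.takeWhile_cons, hb]; simp
      simp only [h, if_false]
      have hcast : ((j : Int) + 1) = ((j + 1 : Nat) : Int) := by push_cast; ring
      rw [hcast, ih (j + 1) (by omega) (by omega), ht]
      simp [pvOff]
      ring

theorem pvOuter_eq (title : String) (all : List String) : ∀ (s : List String) (i : Nat) (cc : Int),
    s = all.drop i →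
    pvOuterA title all s (i : Int) cc
      = (match s.findIdx? (fun line => PySem.Str.isIn (PySem.Str.lower title) (PySem.Str.lower line) && PySem.Str.startswith line "#") with
         | none => PySem.Int.floordiv (cc + pvOff s) 2
         | some k => cc + pvOff (s.take (k + 1)) + pvOff ((s.drop (k + 1)).takeWhile pvNB)) := by
  intro s
  induction s with
  | nil => intro i cc hs; simp [pvOuterA, pvOff]
  | cons l rest ih =>
    intro i cc hs
    have hi : i < all.length := by
      by_contra hcon
      rw [List.drop_eq_nil_of_le (by omega)] at hs
      exact List.cons_ne_nil l rest hs
    have hdrop1 : all.drop (i + 1) = rest := by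
      have := congrArg List.tail hs
      simpa [List.tail_drop] using this.symm
    have hcast : ((i : Int) + 1) = ((i + 1 : Nat) : Int) := by push_cast; ring
    by_cases hp : (PySem.Str.isIn (PySem.Str.lower title) (PySem.Str.lower l) && PySem.Str.startswith l "#") = true
    · simp only [pvOuterA, hp, if_true, List.findIdx?_cons]
      rw [hcast, pvInner_eq all (all.length - (i + 1)) (i + 1) rfl (by omega), hdrop1]
      simp [pvOff]
      ring
    · simp only [pvOuterA, hp, List.findIdx?_cons]
      rw [hcast, ih (i + 1) (cc + PySem.Str.len l + 1) hdrop1.symm]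
      simp only [Bool.false_eq_true, if_false]
      cases hfi : rest.findIdx? (fun line => PySem.Str.isIn (PySem.Str.lower title) (PySem.Str.lower line) && PySem.Str.startswith line "#") with
      | none =>
        simp [pvOff]
        ring_nf
      | some k =>
        simp [pvOff, List.take_succ_cons]
        ring

-- table access: the k-th offset is the total size of the first k lines
theorem pvOffsets_get (lines : List String) (k : Nat) (hk : k ≤ lines.length) :
    (PySem.List.pyGet? ((0 : Int) :: pvOffsetsB lines 0) (k : Int)).getD 0 = pvOff (lines.take k) := by
  rw [pvOffsetsB_eq lines 0, PySem.List.pyGet?_natCast]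
  rw [List.getElem?_eq_getElem (by simpa using by omega)]
  simp

theorem pvOffsets_last (lines : List String) :
    (PySem.List.pyGet? ((0 : Int) :: pvOffsetsB lines 0) (-1)).getD 0 = pvOff lines := by
  rw [pvOffsetsB_eq lines 0, PySem.List.pyGet?_neg_one]
  rw [List.getLast?_eq_getElem?]
  rw [List.getElem?_eq_getElem (by simp)]
  simp

theorem pv_takeWhile_as_take {α : Type} (p : α → Bool) (l : List α) :
    l.takeWhile p = l.take (l.takeWhile p).length := by
  induction l with
  | nil => simp
  | cons x t ih =>
    by_cases h : p x
    · simp [h]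
      exact ih
    · simp [h]

-- ===== VERDICT (by name: the statement is the Claim_ definition above) =====
theorem calculate_insertion_point_py_spec : Claim_equal_calculate_insertion_point_py := by
  unfold Claim_equal_calculate_insertion_point_py
  intro a t _
  unfold Spec_calculate_insertion_point_py
  unfold calculate_insertion_point_py calculate_insertion_point_py_alt
  simp only []
  set lines := (PySem.Str.split? a "\n").getD [] with hl
  have h0 : lines = lines.drop 0 := rfl
  have hmain := pvOuter_eq t lines lines 0 0 h0
  rw [Nat.cast_zero] at hmain
  rw [hmain]
  cases hfi : lines.findIdx? (fun line => PySem.Str.isIn (PySem.Str.lower t) (PySem.Str.lower line) && PySem.Str.startswith line "#") with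
  | none =>
    simp only [pvOffsets_last, zero_add]
  | some k =>
    have hk : k < lines.length :=
      (List.findIdx?_eq_some_iff_findIdx_eq.mp hfi).1
    simp only [zero_add]
    rw [pvAdvance_eq (lines.drop (k + 1)) (k + 1)]
    have hlen : ((lines.drop (k + 1)).takeWhile pvNB).length ≤ lines.length - (k + 1) := by
      calc ((lines.drop (k + 1)).takeWhile pvNB).length ≤ (lines.drop (k + 1)).length :=
            ((lines.drop (k + 1)).takeWhile_prefix pvNB).length_le
        _ = lines.length - (k + 1) := by simp
    rw [pvOffsets_get lines (k + 1 + ((lines.drop (k + 1)).takeWhile pvNB).length) (by omega)]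
    rw [show lines.take (k + 1 + ((lines.drop (k + 1)).takeWhile pvNB).length)
          = lines.take (k + 1) ++ (lines.drop (k + 1)).take ((lines.drop (k + 1)).takeWhile pvNB).length from List.take_add, pvOff_append,
        ← pv_takeWhile_as_take pvNB (lines.drop (k + 1))]
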